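-- pv_equiv track=rewrite | github.com/irakliok/CS115 | Kung Fu Panda's Staircase-PopQuiz.py | KFP_slow
-- ===== SOURCE A (Python) =====
-- def KFP_slow(n):
--     if n <= 0:
--         return 0
--     elif n == 1:
--         return 1
--     else:
--         OneStep = 1 + KFP_slow(n - 1)
--         TwoStep = 1 + KFP_slow(n - 2)
--         ThreeStep = 1 + KFP_slow(n - 3)
--         return OneStep + TwoStep + ThreeStep
-- ===== SOURCE B (Python) =====
-- def KFP_slow(n):
--     if n <= 0:
--         return 0
--     a, b, c = 0, 0, 1  # f(k-2), f(k-1), f(k), starting at k=1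
--     for _ in range(2, n + 1):
--         a, b, c = b, c, 3 + a + b + c
--     return c
-- ===== Notes on version B (the rewrite author's own statement) =====
-- stated objective: faster
-- what changed: Replaced the triple-branching exponential recursion with a bottom-up loop carrying the last three values; intended as faster (O(n) vs O(3^n)) — a timing run measured B hundreds of times faster at the largest size both finished but could not fully confirm because A times out on larger inputs.
import Mathlib
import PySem

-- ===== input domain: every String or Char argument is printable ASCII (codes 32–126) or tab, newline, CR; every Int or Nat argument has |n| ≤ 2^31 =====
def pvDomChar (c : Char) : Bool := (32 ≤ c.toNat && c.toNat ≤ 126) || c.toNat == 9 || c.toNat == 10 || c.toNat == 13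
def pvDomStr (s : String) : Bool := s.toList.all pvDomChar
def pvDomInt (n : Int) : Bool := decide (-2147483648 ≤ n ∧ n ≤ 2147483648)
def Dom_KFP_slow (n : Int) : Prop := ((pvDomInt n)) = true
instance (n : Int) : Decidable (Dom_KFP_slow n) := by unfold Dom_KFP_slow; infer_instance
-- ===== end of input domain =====

-- B replaces A's exponential triple recursion with a bottom-up loop over the last three values; intended as faster (a timing run measured B hundreds of times faster at the largest size both finished, unconfirmed since A times out beyond that).

-- ===== PORT A =====
def KFP_slow (n : Int) : Int :=
  if n ≤ 0 then 0
  else if n = 1 then 1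
  else
    let OneStep := 1 + KFP_slow (n - 1)
    let TwoStep := 1 + KFP_slow (n - 2)
    let ThreeStep := 1 + KFP_slow (n - 3)
    OneStep + TwoStep + ThreeStep
termination_by n.toNat
decreasing_by all_goals omega

-- ===== PORT B =====
def KFP_slow_alt (n : Int) : Int :=
  if n ≤ 0 then 0
  else
    ((PySem.List.pyRange 2 (n + 1) 1).foldl
      (fun (st : Int × Int × Int) _ => (st.2.1, st.2.2, 3 + st.1 + st.2.1 + st.2.2))
      (0, 0, 1)).2.2

-- ===== PRECONDITION & SPEC =====
-- Pre_ keeps n below CPython's default recursion limit: above the bound A's n-deep first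
-- descent overflows the interpreter stack (RecursionError) instead of returning.
def Pre_KFP_slow (n : Int) : Prop := n ≤ 998
instance (n : Int) : Decidable (Pre_KFP_slow n) := by unfold Pre_KFP_slow; infer_instance
def pvWitness_KFP_slow : Int := 7

def Spec_KFP_slow (n : Int) (out : Int) : Prop := out = KFP_slow_alt n
instance (n : Int) (out : Int) : Decidable (Spec_KFP_slow n out) := by unfold Spec_KFP_slow; infer_instance

-- ===== CLAIM (what is proved, stated in full; the proofs are below) =====
def Claim_equal_KFP_slow : Prop := ∀ (n : Int), Dom_KFP_slow n → Pre_KFP_slow n → Spec_KFP_slow n (KFP_slow n)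

-- ===== LEMMAS AND PROOFS =====

theorem KFP_slow_nonpos {n : Int} (h : n ≤ 0) : KFP_slow n = 0 := by
  rw [KFP_slow]; simp [h]

theorem KFP_slow_one : KFP_slow 1 = 1 := by
  rw [KFP_slow]; norm_num

theorem KFP_slow_step {n : Int} (h : 2 ≤ n) :
    KFP_slow n = 3 + KFP_slow (n - 3) + KFP_slow (n - 2) + KFP_slow (n - 1) := by
  rw [KFP_slow]
  have h1 : ¬ n ≤ 0 := by omega
  have h2 : ¬ n = 1 := by omega
  simp only [h1, h2, if_false]
  ring

-- loop invariant: after folding over range 2..(k+1) the state is (f(k-2), f(k-1), f(k)), for k ≥ 1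
theorem KFP_loop_inv (m : Nat) :
    ((PySem.List.pyRange 2 ((1 : Int) + m + 1) 1).foldl
      (fun (st : Int × Int × Int) _ => (st.2.1, st.2.2, 3 + st.1 + st.2.1 + st.2.2))
      (0, 0, 1)) =
    (KFP_slow ((1 : Int) + m - 2), KFP_slow ((1 : Int) + m - 1), KFP_slow ((1 : Int) + m)) := by
  induction m with
  | zero =>
    rw [PySem.List.pyRange_one_eq_nil (by norm_num)]
    simp only [List.foldl_nil]
    norm_num [KFP_slow_one, KFP_slow_nonpos (by norm_num : (-1 : Int) ≤ 0),
      KFP_slow_nonpos (le_refl (0 : Int))]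
  | succ k ih =>
    have hk : (1 : Int) + (k + 1 : Nat) + 1 = ((1 : Int) + k + 1) + 1 := by push_cast; ring
    rw [hk, PySem.List.pyRange_one_succ_right (by omega), List.foldl_append]
    rw [ih]
    simp only [List.foldl_cons, List.foldl_nil]
    have h2 : (2 : Int) ≤ 1 + (k + 1 : Nat) := by push_cast; omega
    rw [KFP_slow_step h2]
    push_cast
    have e1 : (1 : Int) + (k + 1) - 2 = 1 + k - 1 := by ring
    have e2 : (1 : Int) + (k + 1) - 1 = 1 + k := by ring
    have e3 : (1 : Int) + (k + 1) - 3 = 1 + k - 2 := by ring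
    rw [e1, e2, e3]

-- ===== VERDICT (by name: the statement is the Claim_ definition above) =====
theorem KFP_slow_spec : Claim_equal_KFP_slow := by
  intro n _ _
  unfold Spec_KFP_slow KFP_slow_alt
  by_cases h : n ≤ 0
  · simp [h, KFP_slow_nonpos h]
  · simp only [h, if_false]
    have hn : 1 ≤ n := by omega
    obtain ⟨m, hm⟩ : ∃ m : Nat, n = 1 + m := ⟨(n - 1).toNat, by omega⟩
    subst hm
    rw [KFP_loop_inv m]
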